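-- pv_equiv track=rewrite | github.com/mojoee/python_advent_of_code_2022 | day3/main.py | find_badge
-- ===== SOURCE A (Python) =====
-- def find_badge(item):
--     letters_1_2 = set()
--     for letter in item[0]:
--         if letter in item[1]:
--             letters_1_2.add(letter)
--     for letter in item[2]:
--         if letter in letters_1_2:
--             return letter
--     return None
-- ===== SOURCE B (Python) =====
-- def find_badge(item):
--     common = set(item[0]) & set(item[1]) & set(item[2])
--     if not common:
--         return None
--     return min(common, key=item[2].index)
-- ===== Notes on version B (the rewrite author's own statement) =====
-- stated objective: alternative
-- what changed: Replaces A's build-a-membership-set-then-scan-with-early-return by a set-algebra formulation: intersect the three groups as sets and return the argmin of the common characters under their first-occurrence index in item[2] (no scanning loop, no early return; well-defined despite set iteration order because first-occurrence indices are unique).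
import Mathlib
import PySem

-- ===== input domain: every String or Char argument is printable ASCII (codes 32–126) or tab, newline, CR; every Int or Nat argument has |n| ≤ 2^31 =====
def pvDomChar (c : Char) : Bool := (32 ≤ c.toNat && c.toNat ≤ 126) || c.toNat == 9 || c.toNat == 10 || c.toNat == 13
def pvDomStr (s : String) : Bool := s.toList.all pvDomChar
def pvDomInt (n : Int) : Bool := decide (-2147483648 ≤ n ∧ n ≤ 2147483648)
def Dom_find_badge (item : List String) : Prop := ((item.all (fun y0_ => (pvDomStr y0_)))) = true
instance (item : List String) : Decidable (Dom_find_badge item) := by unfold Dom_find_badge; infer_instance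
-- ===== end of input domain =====

-- B replaces A's build-a-set-then-scan loops by set algebra: intersect the three groups and take the
-- argmin of the common characters under their first-occurrence index in item[2] (same value, no scan loop).

-- ===== PORT A =====
-- A's second loop (scan item[2], return on the first hit)
def scanA (s : PySem.Set Char) : List Char → Option String
  | [] => none
  | c :: rest => if PySem.Set.contains s c then some (String.ofList [c]) else scanA s rest

def find_badge (item : List String) : Option String :=
  match PySem.List.pyGet? item 0, PySem.List.pyGet? item 1, PySem.List.pyGet? item 2 with
  | some s0, some s1, some s2 =>
      let letters_1_2 : PySem.Set Char :=
        s0.toList.foldl (fun acc c => if c ∈ s1.toList then PySem.Set.add acc c else acc) PySem.Set.empty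
      scanA letters_1_2 s2.toList
  | _, _, _ => none

-- ===== PORT B =====
-- min(common, key=item[2].index): every member of common is in item[2], so index? is always `some`
-- there (the .getD 0 default is never reached); the minimiser is unique (first-occurrence indices are
-- injective on distinct characters), so Python's set iteration order cannot affect the result.
def find_badge_alt (item : List String) : Option String :=
  match PySem.List.pyGet? item 0 with
  | none => none
  | some s0 =>
    match PySem.List.pyGet? item 1 with
    | none => none
    | some s1 =>
      match PySem.List.pyGet? item 2 with
      | none => none
      | some s2 =>
        let common : PySem.Set Char :=
          PySem.Set.inter (PySem.Set.inter (PySem.Set.ofList s0.toList) (PySem.Set.ofList s1.toList))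
            (PySem.Set.ofList s2.toList)
        if common = [] then none
        else (PySem.List.min? common (fun c => (PySem.List.index? s2.toList c).getD 0)).map
               (fun c => String.ofList [c])

-- ===== PRECONDITION & SPEC =====
-- A indexes item[0], item[1], item[2]; it raises IndexError exactly when the list has fewer than 3 elements.
def Pre_find_badge (item : List String) : Prop := 3 ≤ item.length
instance (item : List String) : Decidable (Pre_find_badge item) := by unfold Pre_find_badge; infer_instance
def pvWitness_find_badge : List String := ["ab", "bc", "b"]

def Spec_find_badge (item : List String) (out : Option String) : Prop := out = find_badge_alt item
instance (item : List String) (out : Option String) : Decidable (Spec_find_badge item out) := by unfold Spec_find_badge; infer_instance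

-- ===== CLAIM (what is proved, stated in full; the proofs are below) =====
def Claim_equal_find_badge : Prop := ∀ (item : List String), Dom_find_badge item → Pre_find_badge item → Spec_find_badge item (find_badge item)

-- ===== LEMMAS AND PROOFS =====

theorem mem_fold_set (l1 : List Char) (c : Char) :
    ∀ (l0 : List Char) (acc : PySem.Set Char),
      (c ∈ l0.foldl (fun acc c => if c ∈ l1 then PySem.Set.add acc c else acc) acc)
        ↔ c ∈ acc ∨ (c ∈ l0 ∧ c ∈ l1) := by
  intro l0
  induction l0 with
  | nil => intro acc; simp
  | cons x xs ih =>
      intro acc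
      simp only [List.foldl_cons]
      rcases eq_or_ne c x with rfl | hne
      · by_cases hx : c ∈ l1 <;> simp [hx, ih, PySem.Set.mem_add]
      · by_cases hx : x ∈ l1 <;> simp [hx, ih, PySem.Set.mem_add, hne]

-- A's scan is the first element of l2 whose membership test succeeds
theorem scanA_eq_find (s : PySem.Set Char) (p : Char → Bool)
    (hs : ∀ c, PySem.Set.contains s c = p c) :
    ∀ l2 : List Char, scanA s l2 = (l2.find? p).map (fun c => String.ofList [c]) := by
  intro l2
  induction l2 with
  | nil => simp [scanA]
  | cons c rest ih =>
      simp only [scanA, hs]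
      by_cases h : p c
      · simp [h]
      · simp [h, ih]

-- B's argmin-by-first-index over the triple intersection is the same first element
theorem argmin_eq_find (l0 l1 l2 : List Char) :
    (let common : PySem.Set Char :=
        PySem.Set.inter (PySem.Set.inter (PySem.Set.ofList l0) (PySem.Set.ofList l1))
          (PySem.Set.ofList l2)
     if common = [] then none
     else (PySem.List.min? common (fun c => (PySem.List.index? l2 c).getD 0)).map
            (fun c => String.ofList [c]))
    = (l2.find? (fun c => decide (c ∈ l0 ∧ c ∈ l1))).map (fun c => String.ofList [c]) := by
  set common : PySem.Set Char :=
      PySem.Set.inter (PySem.Set.inter (PySem.Set.ofList l0) (PySem.Set.ofList l1))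
        (PySem.Set.ofList l2) with hC
  have hmem : ∀ c : Char, c ∈ common ↔ (c ∈ l0 ∧ c ∈ l1) ∧ c ∈ l2 := by
    intro c
    simp only [common, PySem.Set.mem_inter, PySem.Set.mem_ofList]
  rcases hfind : l2.find? (fun c => decide (c ∈ l0 ∧ c ∈ l1)) with _ | c
  · -- no common character: the intersection is empty
    have : common = [] := by
      rw [List.eq_nil_iff_forall_not_mem]
      intro x hx
      rcases (hmem x).1 hx with ⟨hp, hx2⟩
      have := List.find?_eq_none.1 hfind x hx2
      simp [hp.1, hp.2] at this
    simp [this]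
  · -- first hit c: show the argmin is exactly c
    rcases List.find?_eq_some_iff_append.1 hfind with ⟨hpc, as, bs, hsplit, hpre⟩
    have hpc' : c ∈ l0 ∧ c ∈ l1 := by simpa using hpc
    have hcl2 : c ∈ l2 := by rw [hsplit]; simp
    have hcC : c ∈ common := (hmem c).2 ⟨hpc', hcl2⟩
    have hne : common ≠ [] := fun h => by simp [h] at hcC
    -- the element at position as.length of l2 is c
    have hlen : as.length < l2.length := by rw [hsplit]; simp
    have hat : l2[as.length]'hlen = c := by
      simp [hsplit]
    -- first-occurrence index of any member of common is ≥ as.length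
    have hkey_ge : ∀ d ∈ common, ∀ j, PySem.List.index? l2 d = some j → as.length ≤ j := by
      intro d hd j hj
      by_contra hlt
      rw [not_le] at hlt
      rcases List.idxOf?_eq_some_iff.1 hj with ⟨hjl, hdj, _⟩
      have htake : l2.take as.length = as := by rw [hsplit]; simp
      have hdas : d ∈ as := by
        have hj' : j < (l2.take as.length).length := by
          rw [htake]; exact hlt
        have hmemt : (l2.take as.length)[j]'hj' ∈ l2.take as.length := List.getElem_mem _
        have hval : (l2.take as.length)[j]'hj' = d := by
          rw [← hdj]; exact List.getElem_take
        rw [hval, htake] at hmemt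
        exact hmemt
      rcases (hmem d).1 hd with ⟨⟨h0, h1⟩, _⟩
      have := hpre d hdas
      simp [h0, h1] at this
    -- first-occurrence index of c is exactly as.length
    have hidxc : PySem.List.index? l2 c = some as.length := by
      rcases hjc : l2.idxOf? c with _ | jc
      · exact absurd (List.idxOf?_eq_none_iff.1 hjc) (by simpa using hcl2)
      · rcases List.idxOf?_eq_some_iff.1 hjc with ⟨hjl, hcj, hmin⟩
        have hge : as.length ≤ jc := hkey_ge c hcC jc (by simpa [PySem.List.index?] using hjc)
        have hle : jc ≤ as.length := by
          by_contra hgt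
          rw [not_le] at hgt
          exact hmin as.length hgt hat
        have : jc = as.length := le_antisymm hle hge
        simpa [PySem.List.index?, this] using hjc
    -- the min? over common exists and must be c
    rcases hm : PySem.List.min? common (fun c => (PySem.List.index? l2 c).getD 0) with _ | m
    · exact absurd ((PySem.List.min?_eq_none_iff _ _).1 hm) hne
    · have hmC : m ∈ common := PySem.List.min?_mem hm
      rcases (hmem m).1 hmC with ⟨_, hml2⟩
      rcases hjm : l2.idxOf? m with _ | jm
      · exact absurd (List.idxOf?_eq_none_iff.1 hjm) (by simpa using hml2)
      · have hjm' : PySem.List.index? l2 m = some jm := by simpa [PySem.List.index?] using hjm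
        have h1 : as.length ≤ jm := hkey_ge m hmC jm hjm'
        have h2 : jm ≤ as.length := by
          have hmin := PySem.List.min?_isMin hm c hcC
          simp only [PySem.List.index?] at hmin hjm' hidxc
          rw [hjm', hidxc] at hmin
          simpa using hmin
        have hjmeq : jm = as.length := le_antisymm h2 h1
        have hmc : m = c := by
          subst hjmeq
          rcases List.idxOf?_eq_some_iff.1 hjm with ⟨hjl, hmj, _⟩
          exact hmj.symm.trans hat
        rw [if_neg hne, hm, hmc]

-- ===== VERDICT (by name: the statement is the Claim_ definition above) =====
theorem find_badge_spec : Claim_equal_find_badge := by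
  intro item _ hpre
  unfold Spec_find_badge find_badge find_badge_alt
  have h0 : PySem.List.pyGet? item 0 = item[0]? := by
    simpa using PySem.List.pyGet?_natCast (xs := item) (n := 0)
  have h1 : PySem.List.pyGet? item 1 = item[1]? := by
    simpa using PySem.List.pyGet?_natCast (xs := item) (n := 1)
  have h2 : PySem.List.pyGet? item 2 = item[2]? := by
    simpa using PySem.List.pyGet?_natCast (xs := item) (n := 2)
  unfold Pre_find_badge at hpre
  rw [h0, h1, h2]
  rw [List.getElem?_eq_getElem (by omega), List.getElem?_eq_getElem (by omega),
      List.getElem?_eq_getElem (by omega)]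
  simp only
  rw [argmin_eq_find]
  apply scanA_eq_find
  intro c
  have := mem_fold_set (item[1]'(by omega)).toList c (item[0]'(by omega)).toList PySem.Set.empty
  simp only [PySem.Set.empty] at this
  by_cases h : c ∈ (item[0]'(by omega)).toList ∧ c ∈ (item[1]'(by omega)).toList
  · simp [this, h]
  · simp [this, h]
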